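-- pv_equiv track=rewrite | github.com/netra-systems/zen | scripts/auto_split_files.py | _find_logical_split_points
-- ===== SOURCE A (Python) =====
-- from typing import Any, Dict, List, Optional, Tuple
--
-- def _find_logical_split_points(lines: List[str]) -> List[Dict[str, int]]:
--     """Find logical points to split the file."""
--     split_points = []
--     current_start = 1
--
--     for i, line in enumerate(lines):
--         # Look for major section separators
--         if (line.strip().startswith('#') and len(line.strip()) > 10) or \
--            (line.strip() == '' and i > 0 and lines[i-1].strip() == ''):
--
--             if i - current_start > 50:  # Minimum section size
--                 split_points.append({
--                     "start": current_start,
--                     "end": i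
--                 })
--                 current_start = i + 1
--
--     # Add final section
--     if current_start < len(lines):
--         split_points.append({
--             "start": current_start,
--             "end": len(lines)
--         })
--
--     return split_points
-- ===== SOURCE B (Python) =====
-- from typing import Any, Dict, List, Optional, Tuple
--
-- def _find_logical_split_points(lines: List[str]) -> List[Dict[str, int]]:
--     """Find logical points to split the file.
--
--     Collect the sorted separator indices once, then find each cut with a
--     binary search for the first candidate beyond start+50, instead of
--     greedily scanning every line against the running section start."""
--     candidates = [i for i, line in enumerate(lines)
--                   if (line.strip().startswith('#') and len(line.strip()) > 10)
--                   or (line.strip() == '' and i > 0 and lines[i - 1].strip() == '')]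
--
--     sections = []
--     start = 1
--     pos = 0
--     while pos < len(candidates):
--         # first position >= pos whose candidate is >= start + 51 (binary search)
--         lo, hi = pos, len(candidates)
--         target = start + 51
--         while lo < hi:
--             mid = (lo + hi) // 2
--             if candidates[mid] < target:
--                 lo = mid + 1
--             else:
--                 hi = mid
--         if lo == len(candidates):
--             break
--         idx = candidates[lo]
--         sections.append({"start": start, "end": idx})
--         start = idx + 1
--         pos = lo + 1
--
--     if start < len(lines):
--         sections.append({"start": start, "end": len(lines)})
--     return sections
-- ===== Notes on version B (the rewrite author's own statement) =====
-- stated objective: alternative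
-- what changed: B collects the sorted separator indices in one pass and then finds each section cut by binary-searching that list for the first candidate past start+50, replacing A's single greedy line-by-line scan with its running gap test.
import Mathlib
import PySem

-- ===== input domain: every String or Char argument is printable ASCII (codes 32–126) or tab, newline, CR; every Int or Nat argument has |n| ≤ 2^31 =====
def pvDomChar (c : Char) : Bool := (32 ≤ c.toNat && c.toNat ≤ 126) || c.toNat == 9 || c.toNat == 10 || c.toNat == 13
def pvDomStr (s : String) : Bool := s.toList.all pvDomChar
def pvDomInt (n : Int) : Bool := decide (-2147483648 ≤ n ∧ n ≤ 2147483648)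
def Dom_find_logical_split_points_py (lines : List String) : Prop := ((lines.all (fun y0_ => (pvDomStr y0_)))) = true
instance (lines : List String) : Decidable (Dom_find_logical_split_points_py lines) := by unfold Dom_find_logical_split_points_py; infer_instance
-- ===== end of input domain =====

-- B replaces A's greedy line-by-line scan by a candidate-index pass plus a binary search per cut (alternative; same exact result).

-- The separator condition, textually identical in both sources.
def pvSep (lines : List String) (i : Int) (line : String) : Bool :=
  (PySem.Str.startswith (PySem.Str.strip line) "#" && decide ((10 : Int) < PySem.Str.len (PySem.Str.strip line)))
  || (decide (PySem.Str.strip line = "") && decide ((0 : Int) < i)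
      && decide (PySem.Str.strip (PySem.List.pyGetD lines (i - 1) "") = ""))

-- ===== PORT A =====
def find_logical_split_points_py (lines : List String) : List (List (String × Int)) :=
  let r := (PySem.List.enumerate lines 0).foldl
    (fun (st : List (List (String × Int)) × Int) (p : Int × String) =>
      if pvSep lines p.1 p.2 then
        if (50 : Int) < p.1 - st.2 then
          (st.1 ++ [[("start", st.2), ("end", p.1)]], p.1 + 1)
        else st
      else st)
    ([], 1)
  if r.2 < PySem.List.len lines then
    r.1 ++ [[("start", r.2), ("end", PySem.List.len lines)]]
  else r.1

-- ===== PORT B =====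
-- hand-written binary search from Source B: first position in [lo, hi) whose candidate is ≥ target.
-- fuel (hi - lo at the call site) only makes the while-loop total; it never runs out.
def pvBsearch (cands : List Int) : Nat → Nat → Nat → Int → Nat
  | 0, lo, _, _ => lo
  | fuel + 1, lo, hi, target =>
    if lo < hi then
      let mid := (lo + hi) / 2
      if cands.getD mid 0 < target then pvBsearch cands fuel (mid + 1) hi target
      else pvBsearch cands fuel lo mid target
    else lo

-- the outer while loop of Source B: pos is the search window's left edge, start the running section
-- start; fuel (list length + 1 at the call site) only makes the loop total; it never runs out.
def pvLoopB (cands : List Int) : Nat → Nat → Int → List (List (String × Int)) →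
    List (List (String × Int)) × Int
  | 0, _, start, acc => (acc, start)
  | fuel + 1, pos, start, acc =>
    if pos < cands.length then
      let lo := pvBsearch cands (cands.length - pos) pos cands.length (start + 51)
      if lo < cands.length then
        let idx := cands.getD lo 0
        pvLoopB cands fuel (lo + 1) (idx + 1) (acc ++ [[("start", start), ("end", idx)]])
      else (acc, start)
    else (acc, start)

def find_logical_split_points_py_alt (lines : List String) : List (List (String × Int)) :=
  let candidates := ((PySem.List.enumerate lines 0).filter (fun p => pvSep lines p.1 p.2)).map Prod.fst
  let r := pvLoopB candidates (candidates.length + 1) 0 1 []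
  if r.2 < PySem.List.len lines then
    r.1 ++ [[("start", r.2), ("end", PySem.List.len lines)]]
  else r.1

-- ===== PRECONDITION & SPEC =====
def Spec_find_logical_split_points_py (lines : List String) (out : List (List (String × Int))) : Prop := out = find_logical_split_points_py_alt lines
instance (lines : List String) (out : List (List (String × Int))) : Decidable (Spec_find_logical_split_points_py lines out) := by unfold Spec_find_logical_split_points_py; infer_instance

-- ===== CLAIM (what is proved, stated in full; the proofs are below) =====
def Claim_equal_find_logical_split_points_py : Prop := ∀ (lines : List String), Dom_find_logical_split_points_py lines → Spec_find_logical_split_points_py lines (find_logical_split_points_py lines)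

-- ===== LEMMAS AND PROOFS =====

-- the greedy step of A, specialised to a candidate index
def pvStep (st : List (List (String × Int)) × Int) (c : Int) : List (List (String × Int)) × Int :=
  if (50 : Int) < c - st.2 then (st.1 ++ [[("start", st.2), ("end", c)]], c + 1) else st

theorem pvBsearch_bounds (cands : List Int) (target : Int) :
    ∀ fuel lo hi, hi - lo ≤ fuel → lo ≤ hi →
      lo ≤ pvBsearch cands fuel lo hi target ∧ pvBsearch cands fuel lo hi target ≤ hi := by
  intro fuel
  induction fuel with
  | zero => intro lo hi h1 h2; simp only [pvBsearch]; omega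
  | succ n ih =>
      intro lo hi h1 h2
      rw [pvBsearch]
      by_cases h : lo < hi
      · simp only [h, if_pos]
        by_cases hc : cands.getD ((lo + hi) / 2) 0 < target
        · simp only [hc, if_pos]
          have := ih ((lo + hi) / 2 + 1) hi (by omega) (by omega)
          omega
        · simp only [hc, if_false]
          have := ih lo ((lo + hi) / 2) (by omega) (by omega)
          omega
      · simp only [h, if_false]; omega

theorem pvBsearch_correct (cands : List Int) (target : Int)
    (hmono : ∀ (i j : Nat) (hj : j < cands.length) (hij : i < j), cands[i]'(lt_trans hij hj) < cands[j]) :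
    ∀ fuel lo hi, hi - lo ≤ fuel → hi ≤ cands.length →
      (∀ k : Nat, lo ≤ k → k < pvBsearch cands fuel lo hi target → (hk : k < cands.length) → cands[k] < target) ∧
      (∀ k : Nat, pvBsearch cands fuel lo hi target ≤ k → k < hi → (hk : k < cands.length) → target ≤ cands[k]) := by
  intro fuel
  induction fuel with
  | zero =>
      intro lo hi h1 h2
      simp only [pvBsearch]
      exact ⟨fun k hk1 hk2 _ => by omega, fun k hk1 hk2 _ => by omega⟩
  | succ n ih =>
      intro lo hi h1 hhi
      rw [pvBsearch]
      by_cases h : lo < hi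
      · simp only [h, if_pos]
        have hmid : (lo + hi) / 2 < cands.length := by omega
        by_cases hc : cands.getD ((lo + hi) / 2) 0 < target
        · simp only [hc, if_pos]
          rw [List.getD_eq_getElem cands 0 hmid] at hc
          obtain ⟨ih1, ih2⟩ := ih ((lo + hi) / 2 + 1) hi (by omega) hhi
          constructor
          · intro k hk1 hk2 hk3
            by_cases hcase : (lo + hi) / 2 + 1 ≤ k
            · exact ih1 k hcase hk2 hk3
            · have hle : k ≤ (lo + hi) / 2 := by omega
              rcases Nat.lt_or_eq_of_le hle with hlt2 | heq
              · exact lt_trans (hmono k _ hmid hlt2) hc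
              · subst heq; exact hc
          · exact ih2
        · simp only [hc, if_false]
          rw [List.getD_eq_getElem cands 0 hmid] at hc
          rw [not_lt] at hc
          obtain ⟨ih1, ih2⟩ := ih lo ((lo + hi) / 2) (by omega) (by omega)
          constructor
          · exact ih1
          · intro k hk1 hk2 hk3
            by_cases hcase : k < (lo + hi) / 2
            · exact ih2 k hk1 hcase hk3
            · rcases Nat.lt_or_eq_of_le (by omega : (lo + hi) / 2 ≤ k) with hlt2 | heq
              · exact le_trans hc (le_of_lt (hmono _ k hk3 hlt2))
              · subst heq; exact hc
      · simp only [h, if_false]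
        exact ⟨fun k hk1 hk2 _ => by omega, fun k hk1 hk2 _ => by omega⟩

-- fold over candidates all strictly below start+51 does nothing
theorem pvFold_noop (l : List Int) (acc : List (List (String × Int))) (start : Int)
    (h : ∀ c ∈ l, c < start + 51) :
    l.foldl pvStep (acc, start) = (acc, start) := by
  induction l with
  | nil => rfl
  | cons c l ih =>
      have hc := h c (by simp)
      simp only [List.foldl_cons, pvStep]
      rw [if_neg (by omega)]
      exact ih (fun d hd => h d (by simp [hd]))

-- B's binary-search loop computes A's greedy fold over the remaining candidates
theorem pvLoopB_eq_fold (cands : List Int)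
    (hmono : ∀ (i j : Nat) (hj : j < cands.length) (hij : i < j), cands[i]'(lt_trans hij hj) < cands[j]) :
    ∀ fuel pos start acc, cands.length - pos < fuel →
      pvLoopB cands fuel pos start acc = (cands.drop pos).foldl pvStep (acc, start) := by
  intro fuel
  induction fuel with
  | zero => intro pos start acc h; omega
  | succ n ih =>
      intro pos start acc hfuel
      rw [pvLoopB]
      by_cases hpos : pos < cands.length
      · simp only [hpos, if_pos]
        obtain ⟨hb1, hb2⟩ := pvBsearch_correct cands (start + 51) hmono (cands.length - pos)
          pos cands.length (le_refl _) (le_refl _)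
        have hlo := pvBsearch_bounds cands (start + 51) (cands.length - pos) pos cands.length
          (le_refl _) (by omega)
        set lo := pvBsearch cands (cands.length - pos) pos cands.length (start + 51) with hlodef
        by_cases h2 : lo < cands.length
        · simp only [h2, if_pos]
          rw [List.getD_eq_getElem cands 0 h2]
          have hld : (cands.drop pos).length = cands.length - pos := by simp
          have hsplit : cands.drop pos
              = (cands.drop pos).take (lo - pos) ++ cands[lo] :: cands.drop (lo + 1) := by
            conv_lhs => rw [← List.take_append_drop (lo - pos) (cands.drop pos)]
            congr 1
            rw [List.drop_drop]
            rw [show pos + (lo - pos) = lo from by omega]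
            exact List.drop_eq_getElem_cons h2
          have hnoop : ((cands.drop pos).take (lo - pos)).foldl pvStep (acc, start) = (acc, start) := by
            apply pvFold_noop
            intro c hc
            obtain ⟨k, hk, hck⟩ := List.getElem_of_mem hc
            have hk1 : k < lo - pos := lt_of_lt_of_le hk (List.length_take_le _ _)
            rw [List.getElem_take, List.getElem_drop] at hck
            have := hb1 (pos + k) (by omega) (by omega) (by omega)
            omega
          rw [hsplit, List.foldl_append, hnoop]
          simp only [List.foldl_cons]
          have hcut : pvStep (acc, start) cands[lo]
              = (acc ++ [[("start", start), ("end", cands[lo])]], cands[lo] + 1) := by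
            have := hb2 lo (le_refl _) h2 h2
            simp only [pvStep]
            rw [if_pos (by omega)]
          rw [hcut]
          exact ih (lo + 1) (cands[lo] + 1) _ (by omega)
        · simp only [h2, if_false]
          symm
          apply pvFold_noop
          intro c hc
          obtain ⟨k, hk, hck⟩ := List.getElem_of_mem hc
          have hld : (cands.drop pos).length = cands.length - pos := by simp
          rw [List.getElem_drop] at hck
          have := hb1 (pos + k) (by omega) (by omega) (by omega)
          omega
      · simp only [hpos, if_false]
        rw [List.drop_of_length_le (by omega)]
        rfl

-- candidates (mapped firsts of the filtered enumeration) are strictly increasing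
theorem pvCands_mono (lines : List String) :
    ∀ (i j : Nat)
      (hj : j < (((PySem.List.enumerate lines 0).filter (fun p => pvSep lines p.1 p.2)).map Prod.fst).length)
      (hij : i < j),
      (((PySem.List.enumerate lines 0).filter (fun p => pvSep lines p.1 p.2)).map Prod.fst)[i]'(lt_trans hij hj)
        < (((PySem.List.enumerate lines 0).filter (fun p => pvSep lines p.1 p.2)).map Prod.fst)[j] := by
  have hp : (((PySem.List.enumerate lines 0).filter (fun p => pvSep lines p.1 p.2)).map Prod.fst).Pairwise (· < ·) := by
    apply List.Pairwise.map
    · exact fun a b h => h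
    · exact List.Pairwise.filter _ (PySem.List.pairwise_lt_enumerate lines 0)
  intro i j hj hij
  exact (List.pairwise_iff_getElem.mp hp) i j (by omega) hj hij

-- A's fused fold equals the greedy fold over the candidate list
theorem pvA_eq_fold (lines : List String) :
    (PySem.List.enumerate lines 0).foldl
      (fun (st : List (List (String × Int)) × Int) (p : Int × String) =>
        if pvSep lines p.1 p.2 then
          if (50 : Int) < p.1 - st.2 then
            (st.1 ++ [[("start", st.2), ("end", p.1)]], p.1 + 1)
          else st
        else st)
      ([], 1)
    = (((PySem.List.enumerate lines 0).filter (fun p => pvSep lines p.1 p.2)).map Prod.fst).foldl pvStep ([], 1) := by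
  rw [List.foldl_map, List.foldl_filter]
  rfl

-- ===== VERDICT (by name: the statement is the Claim_ definition above) =====
theorem find_logical_split_points_py_spec : Claim_equal_find_logical_split_points_py := by
  intro lines _
  unfold Spec_find_logical_split_points_py
  simp only [find_logical_split_points_py, find_logical_split_points_py_alt]
  rw [pvLoopB_eq_fold _ (pvCands_mono lines) _ 0 1 [] (by omega)]
  rw [List.drop_zero, pvA_eq_fold]
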